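-- pv_equiv track=rewrite | github.com/pc5401/my_BOJ | 백준/Silver/4779. 칸토어 집합/칸토어 집합.py | solve
-- ===== SOURCE A (Python) =====
-- def solve(lst: list[str]) -> int:
--     words = ['-', '- -', '- -   - -', '- -   - -         - -   - -']
--
--     i = 27
--     for _ in range(4, 13):
--         word = words[-1]
--         mid = ' '* len(word)
--         words.append(word + mid + word)
--
--     return [ words[i] for i in lst]
-- ===== SOURCE B (Python) =====
-- def solve(lst):
--     def has_one(n, j):
--         # does the n-digit base-3 representation of j contain a digit 1?
--         for _ in range(n):
--             if j % 3 == 1: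
--                 return True
--             j //= 3
--         return False
--     words = [''.join(' ' if has_one(n, j) else '-' for j in range(3 ** n))
--              for n in range(13)]
--     return [words[i] for i in lst]
-- ===== Notes on version B (the rewrite author's own statement) =====
-- stated objective: alternative
-- what changed: Each Cantor level is built independently, character by character, by testing whether the position's base-3 digits contain a 1, instead of A's self-concatenation doubling from four hardcoded seed strings.
import Mathlib
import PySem

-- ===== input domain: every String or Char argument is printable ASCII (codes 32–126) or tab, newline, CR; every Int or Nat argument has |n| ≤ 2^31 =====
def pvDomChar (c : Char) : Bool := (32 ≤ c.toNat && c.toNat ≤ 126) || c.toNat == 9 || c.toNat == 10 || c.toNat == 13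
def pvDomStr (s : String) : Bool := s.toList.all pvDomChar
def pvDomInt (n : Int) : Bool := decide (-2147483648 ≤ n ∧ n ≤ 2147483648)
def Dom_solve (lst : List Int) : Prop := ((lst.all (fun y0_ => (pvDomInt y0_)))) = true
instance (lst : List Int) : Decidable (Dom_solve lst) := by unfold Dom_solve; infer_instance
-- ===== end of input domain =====

-- B builds each level independently from the base-3 digits of each position instead of A's
-- self-concatenation doubling; equal cost, different algorithm (objective: alternative).

-- ===== PORT A =====
-- Python str is ported as List Char (String.ofList at the return); words[-1] / words[i] via
-- PySem.List.pyGetD, exact under Pre_solve (in-range indices; words always has 13 elements).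
def solve (lst : List Int) : List String :=
  let words : List (List Char) :=
    [['-'], "- -".toList, "- -   - -".toList, "- -   - -         - -   - -".toList]
  let words := (PySem.List.pyRange 4 13 1).foldl (fun ws _ =>
      let word := PySem.List.pyGetD ws (-1) []
      let mid := List.replicate word.length ' '
      ws ++ [word ++ mid ++ word]) words
  lst.map (fun i => String.ofList (PySem.List.pyGetD words i []))

-- ===== PORT B =====
-- has_one n j : the n low base-3 digits of j contain a 1 (early return = if/else chain)
def hasOne : Nat → Nat → Bool
  | 0, _ => false
  | n + 1, j => if j % 3 == 1 then true else hasOne n (j / 3)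

def solve_alt (lst : List Int) : List String :=
  let words : List (List Char) :=
    (List.range 13).map (fun n =>
      (List.range (3 ^ n)).map (fun j => if hasOne n j then ' ' else '-'))
  lst.map (fun i => String.ofList (PySem.List.pyGetD words i []))

-- ===== PRECONDITION & SPEC =====
-- Pre_solve: every requested index is a valid Python index into the 13-element words list;
-- outside it A raises IndexError.
def Pre_solve (lst : List Int) : Prop := ∀ i ∈ lst, -13 ≤ i ∧ i < 13
instance (lst : List Int) : Decidable (Pre_solve lst) := by unfold Pre_solve; infer_instance
def pvWitness_solve : List Int := [0, 3, -1, 12]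

def Spec_solve (lst : List Int) (out : List String) : Prop := out = solve_alt lst
instance (lst : List Int) (out : List String) : Decidable (Spec_solve lst out) := by unfold Spec_solve; infer_instance

-- ===== CLAIM (what is proved, stated in full; the proofs are below) =====
def Claim_equal_solve : Prop := ∀ (lst : List Int), Dom_solve lst → Pre_solve lst → Spec_solve lst (solve lst)

-- ===== LEMMAS AND PROOFS =====

-- A's recurrence in closed form: level n of the Cantor construction.
def mW : Nat → List Char
  | 0 => ['-']
  | n + 1 => mW n ++ List.replicate ((3:Nat) ^ n) ' ' ++ mW n

theorem length_mW (n : Nat) : (mW n).length = 3 ^ n := by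
  induction n with
  | zero => rfl
  | succ n ih => simp [mW, ih]; ring

-- the doubling step of A's loop
def nextW (w : List Char) : List Char := w ++ List.replicate w.length ' ' ++ w

theorem nextW_mW (n : Nat) : nextW (mW n) = mW (n + 1) := by
  simp [nextW, mW, length_mW]

-- hasOne on the three thirds of a level
theorem hasOne_low : ∀ n j, j < 3 ^ n → hasOne (n + 1) j = hasOne n j := by
  intro n
  induction n with
  | zero => intro j hj; interval_cases j; rfl
  | succ n ih =>
    intro j hj
    show (if j % 3 == 1 then true else hasOne (n + 1) (j / 3)) = _
    rw [ih (j / 3) (by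
      have h3 : (3:Nat) ^ (n+1) = 3 * 3 ^ n := by ring
      omega)]
    rfl

theorem hasOne_mid : ∀ n k, k < 3 ^ n → hasOne (n + 1) (3 ^ n + k) = true := by
  intro n
  induction n with
  | zero => intro k hk; interval_cases k; rfl
  | succ n ih =>
    intro k hk
    show (if (3 ^ (n+1) + k) % 3 == 1 then true else hasOne (n + 1) ((3 ^ (n+1) + k) / 3)) = true
    have hm : (3 ^ (n+1) + k) % 3 = k % 3 := by
      have : (3:Nat) ^ (n+1) + k = k + 3 * 3 ^ n := by ring
      rw [this, Nat.add_mul_mod_self_left]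
    have hd : (3 ^ (n+1) + k) / 3 = 3 ^ n + k / 3 := by
      have : (3:Nat) ^ (n+1) + k = k + 3 * 3 ^ n := by ring
      rw [this, Nat.add_mul_div_left _ _ (by norm_num)]
      omega
    rw [hm, hd]
    by_cases h1 : k % 3 = 1
    · simp [h1]
    · have : (k % 3 == 1) = false := by simpa using h1
      rw [this]
      simp only [Bool.false_eq_true, if_false]
      exact ih (k / 3) (by
        have h3 : (3:Nat) ^ (n+1) = 3 * 3 ^ n := by ring
        omega)

theorem hasOne_high : ∀ n k, k < 3 ^ n → hasOne (n + 1) (2 * 3 ^ n + k) = hasOne n k := by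
  intro n
  induction n with
  | zero => intro k hk; interval_cases k; rfl
  | succ n ih =>
    intro k hk
    show (if (2 * 3 ^ (n+1) + k) % 3 == 1 then true else hasOne (n + 1) ((2 * 3 ^ (n+1) + k) / 3)) = _
    have hm : (2 * 3 ^ (n+1) + k) % 3 = k % 3 := by
      have : 2 * (3:Nat) ^ (n+1) + k = k + 3 * (2 * 3 ^ n) := by ring
      rw [this, Nat.add_mul_mod_self_left]
    have hd : (2 * 3 ^ (n+1) + k) / 3 = 2 * 3 ^ n + k / 3 := by
      have : 2 * (3:Nat) ^ (n+1) + k = k + 3 * (2 * 3 ^ n) := by ring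
      rw [this, Nat.add_mul_div_left _ _ (by norm_num)]
      omega
    rw [hm, hd, ih (k / 3) (by
      have h3 : (3:Nat) ^ (n+1) = 3 * 3 ^ n := by ring
      omega)]
    rfl

-- B's row n
def bRow (n : Nat) : List Char :=
  (List.range (3 ^ n)).map (fun j => if hasOne n j then ' ' else '-')

theorem bRow_eq_mW : ∀ n, bRow n = mW n := by
  intro n
  induction n with
  | zero => rfl
  | succ n ih =>
    have hsplit : (3:Nat) ^ (n + 1) = 3 ^ n + (3 ^ n + 3 ^ n) := by ring
    unfold bRow
    rw [hsplit, List.range_add, List.range_add]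
    simp only [List.map_append, List.map_map]
    have h1 : (List.range (3 ^ n)).map (fun j => if hasOne (n + 1) j then ' ' else '-') = mW n := by
      rw [← ih]; unfold bRow
      exact List.map_congr_left (fun j hj => by
        simp only [hasOne_low n j (List.mem_range.mp hj)])
    have h2 : (List.range (3 ^ n)).map
        ((fun j => if hasOne (n + 1) j then ' ' else '-') ∘ (fun k => 3 ^ n + k))
        = List.replicate (3 ^ n) ' ' := by
      have hc : (List.range (3 ^ n)).map
          ((fun j => if hasOne (n + 1) j then ' ' else '-') ∘ (fun k => 3 ^ n + k))
          = (List.range (3 ^ n)).map (fun _ => ' ') :=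
        List.map_congr_left (fun k hk => by
          simp only [Function.comp_apply, hasOne_mid n k (List.mem_range.mp hk), if_true])
      rw [hc, List.map_const']; simp
    have h3 : (List.range (3 ^ n)).map
        ((fun j => if hasOne (n + 1) j then ' ' else '-') ∘ (fun k => 3 ^ n + k) ∘ (fun k => 3 ^ n + k))
        = mW n := by
      rw [← ih]; unfold bRow
      exact List.map_congr_left (fun k hk => by
        simp only [Function.comp_apply,
          show (3:Nat) ^ n + (3 ^ n + k) = 2 * 3 ^ n + k by ring,
          hasOne_high n k (List.mem_range.mp hk)])
    rw [h1, h2, h3, mW, List.append_assoc]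

-- unrolling A's append loop
theorem foldl_step : ∀ (l : List Int) (ws : List (List Char)) (w : List Char) (n : Nat),
    w = mW n →
    l.foldl (fun ws _ => ws ++ [nextW (PySem.List.pyGetD ws (-1) [])]) (ws ++ [w])
    = (ws ++ [w]) ++ (List.range l.length).map (fun i => mW (n + 1 + i)) := by
  intro l
  induction l with
  | nil => intro ws w n hw; simp
  | cons x l ih =>
    intro ws w n hw
    subst hw
    simp only [List.foldl_cons]
    rw [PySem.List.pyGetD_neg_one_append_singleton, nextW_mW]
    have hih := ih (ws ++ [mW n]) (mW (n + 1)) (n + 1) rfl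
    have key : (List.range (x :: l).length).map (fun i => mW (n + 1 + i))
        = mW (n + 1) :: (List.range l.length).map (fun i => mW (n + 1 + 1 + i)) := by
      rw [List.length_cons, List.range_succ_eq_map, List.map_cons, List.map_map]
      refine congrArg₂ List.cons (by norm_num) ?_
      exact List.map_congr_left (fun i _ => by
        simp only [Function.comp_apply]; congr 1; omega)
    rw [key, hih]
    simp

-- both ports build the same 13 rows
theorem words_eq :
    (PySem.List.pyRange 4 13 1).foldl (fun ws _ =>
        let word := PySem.List.pyGetD ws (-1) []
        let mid := List.replicate word.length ' '
        ws ++ [word ++ mid ++ word])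
      [['-'], "- -".toList, "- -   - -".toList, "- -   - -         - -   - -".toList]
    = (List.range 13).map (fun n =>
        (List.range (3 ^ n)).map (fun j => if hasOne n j then ' ' else '-')) := by
  have hloop : (fun (ws : List (List Char)) (_ : Int) =>
      let word := PySem.List.pyGetD ws (-1) []
      let mid := List.replicate word.length ' '
      ws ++ [word ++ mid ++ word])
      = (fun ws _ => ws ++ [nextW (PySem.List.pyGetD ws (-1) [])]) := by
    funext ws x; rfl
  have hinit : [['-'], "- -".toList, "- -   - -".toList, "- -   - -         - -   - -".toList]
      = [mW 0, mW 1, mW 2] ++ [mW 3] := by decide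
  have hrange : PySem.List.pyRange 4 13 1 = [4, 5, 6, 7, 8, 9, 10, 11, 12] := by decide
  rw [hloop, hinit, hrange, foldl_step _ _ _ 3 rfl]
  have hB : (List.range 13).map (fun n =>
      (List.range (3 ^ n)).map (fun j => if hasOne n j then ' ' else '-'))
      = (List.range 13).map mW := List.map_congr_left (fun n _ => bRow_eq_mW n)
  rw [hB]
  show [mW 0, mW 1, mW 2] ++ [mW 3] ++ (List.range 9).map (fun i => mW (3 + 1 + i))
      = (List.range 13).map mW
  rw [show (13:Nat) = 4 + 9 by rfl, List.range_add, List.map_append, List.map_map]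
  have hfront : (List.range 4).map mW = [mW 0, mW 1, mW 2, mW 3] := by
    simp [List.range_succ]
  have hback : (List.range 9).map (mW ∘ (fun k => 4 + k))
      = (List.range 9).map (fun i => mW (3 + 1 + i)) :=
    List.map_congr_left (fun i _ => by
      simp only [Function.comp_apply])
  rw [hfront, hback]
  simp

-- ===== VERDICT (by name: the statement is the Claim_ definition above) =====
theorem solve_spec : Claim_equal_solve := by
  intro lst _ _
  unfold Spec_solve solve solve_alt
  simp only [words_eq]
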